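-- pv_equiv track=rewrite | github.com/MrBrantCode/unitest_baseline | mut_generate/mist_train_taco/taco_4395/solution.py | calculate_min_steps_to_unlock
-- ===== SOURCE A (Python) =====
-- def calculate_min_steps_to_unlock(test_cases):
--     def check_and_change_to_prime(n):
--         if n == 9 or n == 8:
--             return 7
--         for p in range(n, 2 * n):
--             for i in range(2, p):
--                 if p % i == 0:
--                     break
--             else:
--                 return p
--         return None
--
--     results = []
--
--     for case in test_cases:
--         N, current_code = case
--         count = 0
--         for digit in current_code:
--             digit = int(digit)
--             if digit != 0:
--                 if digit == 1:
--                     count += 1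
--                 else:
--                     count += abs(digit - check_and_change_to_prime(digit))
--         results.append(count)
--
--     return results
-- ===== SOURCE B (Python) =====
-- COST = [0, 1, 0, 0, 1, 0, 1, 0, 1, 2]
--
-- def calculate_min_steps_to_unlock(test_cases):
--     return [sum(COST[int(ch)] for ch in code) for _, code in test_cases]
-- ===== Notes on version B (the rewrite author's own statement) =====
-- stated objective: simpler
-- what changed: Replaces the nested trial-division prime search per digit with a precomputed ten-entry cost table COST[d] = |d - next_prime(d)| (with the 0/1/8/9 special cases folded in), so the body is one lookup-sum per code string.
import Mathlib
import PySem

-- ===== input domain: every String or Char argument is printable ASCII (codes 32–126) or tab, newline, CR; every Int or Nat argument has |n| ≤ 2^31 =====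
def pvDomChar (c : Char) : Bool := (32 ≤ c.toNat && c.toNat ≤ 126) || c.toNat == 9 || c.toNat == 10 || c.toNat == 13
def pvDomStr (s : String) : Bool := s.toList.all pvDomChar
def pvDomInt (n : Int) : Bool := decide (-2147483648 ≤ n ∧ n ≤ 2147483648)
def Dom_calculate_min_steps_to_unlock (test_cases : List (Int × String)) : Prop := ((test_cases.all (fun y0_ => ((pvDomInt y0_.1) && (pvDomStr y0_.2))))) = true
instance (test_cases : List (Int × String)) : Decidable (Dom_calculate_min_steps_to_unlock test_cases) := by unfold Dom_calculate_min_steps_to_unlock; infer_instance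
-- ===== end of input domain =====

-- B replaces the per-digit nested trial-division prime search with a precomputed
-- ten-entry cost table (objective: simpler).

-- ===== PORT A =====
-- inner 'for i in range(2, p): if p % i == 0: break' with for-else:
-- the else branch fires iff no i in range(2, p) divides p
def pvInnerBreaks (p : Int) : Bool :=
  (PySem.List.pyRange 2 p 1).any (fun i => PySem.Int.mod p i == 0)

-- 'for p in range(n, 2*n): … else: return p / return None'
def pvFindP : List Int → Option Int
  | [] => none
  | p :: rest => if pvInnerBreaks p then pvFindP rest else some p

def pvCheckAndChangeToPrime (n : Int) : Option Int :=
  if n == 9 || n == 8 then some 7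
  else pvFindP (PySem.List.pyRange n (2 * n) 1)

-- body of A's inner digit loop; int(digit) via PySem.Int.ofStr? (ValueError = none,
-- excluded by Pre_; likewise 'abs(digit - None)' never happens for digit chars)
def pvStepA (count : Int) (c : Char) : Int :=
  let digit := (PySem.Int.ofStr? (String.ofList [c])).getD 0
  if digit ≠ 0 then
    if digit == 1 then count + 1
    else count + (digit - (pvCheckAndChangeToPrime digit).getD 0).natAbs
  else count

def calculate_min_steps_to_unlock (test_cases : List (Int × String)) : List Int :=
  test_cases.foldl (fun results case =>
    results ++ [case.2.toList.foldl pvStepA 0]) []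

-- ===== PORT B =====
def pvCOST : List Int := [0, 1, 0, 0, 1, 0, 1, 0, 1, 2]

def pvStepB (s : Int) (c : Char) : Int :=
  s + (PySem.List.pyGet? pvCOST ((PySem.Int.ofStr? (String.ofList [c])).getD 0)).getD 0

def calculate_min_steps_to_unlock_alt (test_cases : List (Int × String)) : List Int :=
  test_cases.map (fun case => case.2.toList.foldl pvStepB 0)

-- ===== PRECONDITION & SPEC =====
-- Pre_ excludes codes containing a non-digit character: there int(digit) raises ValueError in A.
def Pre_calculate_min_steps_to_unlock (test_cases : List (Int × String)) : Prop :=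
  (test_cases.all (fun case => case.2.toList.all Char.isDigit)) = true
instance (test_cases : List (Int × String)) : Decidable (Pre_calculate_min_steps_to_unlock test_cases) := by
  unfold Pre_calculate_min_steps_to_unlock; infer_instance

def pvWitness_calculate_min_steps_to_unlock : (List (Int × String)) := [(3, "0123456789"), (1, "")]

def Spec_calculate_min_steps_to_unlock (test_cases : List (Int × String)) (out : List Int) : Prop := out = calculate_min_steps_to_unlock_alt test_cases
instance (test_cases : List (Int × String)) (out : List Int) : Decidable (Spec_calculate_min_steps_to_unlock test_cases out) := by unfold Spec_calculate_min_steps_to_unlock; infer_instance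

-- ===== CLAIM (what is proved, stated in full; the proofs are below) =====
def Claim_equal_calculate_min_steps_to_unlock : Prop := ∀ (test_cases : List (Int × String)), Dom_calculate_min_steps_to_unlock test_cases → Pre_calculate_min_steps_to_unlock test_cases → Spec_calculate_min_steps_to_unlock test_cases (calculate_min_steps_to_unlock test_cases)

-- ===== LEMMAS AND PROOFS =====
theorem pvDigit_cases (c : Char) (h : c.isDigit = true) :
    c = '0' ∨ c = '1' ∨ c = '2' ∨ c = '3' ∨ c = '4' ∨ c = '5' ∨ c = '6' ∨ c = '7' ∨ c = '8' ∨ c = '9' := by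
  have hn : 48 ≤ c.toNat ∧ c.toNat ≤ 57 := by
    simp only [Char.isDigit, decide_eq_true_eq, Bool.and_eq_true] at h
    obtain ⟨h1, h2⟩ := h
    exact ⟨UInt32.le_iff_toNat_le.mp h1, UInt32.le_iff_toNat_le.mp h2⟩
  have hv : c.toNat = 48 ∨ c.toNat = 49 ∨ c.toNat = 50 ∨ c.toNat = 51 ∨
      c.toNat = 52 ∨ c.toNat = 53 ∨ c.toNat = 54 ∨ c.toNat = 55 ∨
      c.toNat = 56 ∨ c.toNat = 57 := by omega
  rcases hv with h | h | h | h | h | h | h | h | h | h <;>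
    rw [← Char.ofNat_toNat c, h] <;> decide

theorem pvStepA_shift (n : Int) (c : Char) : pvStepA n c = n + pvStepA 0 c := by
  unfold pvStepA; dsimp only; split_ifs <;> ring

theorem pvStep_eq (c : Char) (h : c.isDigit = true) (n : Int) : pvStepA n c = pvStepB n c := by
  rw [pvStepA_shift]
  have hB : pvStepB n c = n + pvStepB 0 c := by unfold pvStepB; ring
  rw [hB]
  rcases pvDigit_cases c h with h | h | h | h | h | h | h | h | h | h <;> subst h <;> congr 1

theorem pvFold_eq (l : List Char) (h : l.all Char.isDigit = true) (n : Int) :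
    l.foldl pvStepA n = l.foldl pvStepB n := by
  induction l generalizing n with
  | nil => rfl
  | cons c t ih =>
      simp only [List.all_cons, Bool.and_eq_true] at h
      simp only [List.foldl_cons, pvStep_eq c h.1 n, ih h.2]

theorem pvOuter_eq (tc : List (Int × String)) (h : Pre_calculate_min_steps_to_unlock tc)
    (acc : List Int) :
    tc.foldl (fun results case => results ++ [case.2.toList.foldl pvStepA 0]) acc =
      acc ++ tc.map (fun case => case.2.toList.foldl pvStepB 0) := by
  induction tc generalizing acc with
  | nil => simp
  | cons p t ih =>
      unfold Pre_calculate_min_steps_to_unlock at *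
      simp only [List.all_cons, Bool.and_eq_true] at h
      simp only [List.foldl_cons, List.map_cons, ih h.2, pvFold_eq _ h.1]
      simp

-- ===== VERDICT (by name: the statement is the Claim_ definition above) =====
theorem calculate_min_steps_to_unlock_spec : Claim_equal_calculate_min_steps_to_unlock := by
  intro tc _ hpre
  unfold Spec_calculate_min_steps_to_unlock calculate_min_steps_to_unlock calculate_min_steps_to_unlock_alt
  simpa using pvOuter_eq tc hpre []
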